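-- pv_equiv track=rewrite | github.com/tylerl-IP3Ddev/Production-Weekly-Extractor | Scripts/Production_Weekly_Extractor.py | _extract_studio_name
-- ===== SOURCE A (Python) =====
-- from typing import Dict, List, Tuple, Optional
--
-- def _extract_studio_name(block_lines: List[str]) -> str:
--     """
--     Finds specific, known studio names from a list of lines using a keyword map
--     and returns only their canonical names.
--     """
--     STUDIO_MAP = {
--         "bridge studios": "Bridge Studios", "mammoth studios": "Mammoth Studios",
--         "north shore studios": "North Shore Studios", "martini film studios": "Martini Film Studios",
--         "vancouver film studios": "Vancouver Film Studios", "pinewood studios": "Pinewood Studios",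
--         "studio city": "Studio City", "aspect film studios": "Aspect Film Studios",
--         "big sky studios": "Big Sky Studios", "santa clarita studios": "Santa Clarita Studios",
--         "universal lot studios": "Universal Lot Studios", "culver city studios": "Culver City Studios",
--         "origo studios": "Origo Studios"
--     }
--     found_studios = set()
--     for line in block_lines:
--         line_lower = line.lower()
--         for keyword, canonical_name in STUDIO_MAP.items():
--             if keyword in line_lower:
--                 found_studios.add(canonical_name)
--     return " | ".join(sorted(list(found_studios)))
-- ===== SOURCE B (Python) =====
-- def _extract_studio_name(block_lines):
--     STUDIO_MAP = {
--         "bridge studios": "Bridge Studios", "mammoth studios": "Mammoth Studios",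
--         "north shore studios": "North Shore Studios", "martini film studios": "Martini Film Studios",
--         "vancouver film studios": "Vancouver Film Studios", "pinewood studios": "Pinewood Studios",
--         "studio city": "Studio City", "aspect film studios": "Aspect Film Studios",
--         "big sky studios": "Big Sky Studios", "santa clarita studios": "Santa Clarita Studios",
--         "universal lot studios": "Universal Lot Studios", "culver city studios": "Culver City Studios",
--         "origo studios": "Origo Studios"
--     }
--     text = "\n".join(block_lines).lower()
--     found = {canonical for keyword, canonical in STUDIO_MAP.items() if keyword in text}
--     return " | ".join(sorted(found))
-- ===== Notes on version B (the rewrite author's own statement) =====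
-- stated objective: faster
-- what changed: Replaces the per-line outer loop and mutable set accumulation with one pass: join all lines into a single lowered text (keywords contain no newline, so the separator cannot create cross-line matches) and test each keyword once against it with a set comprehension.
import Mathlib
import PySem

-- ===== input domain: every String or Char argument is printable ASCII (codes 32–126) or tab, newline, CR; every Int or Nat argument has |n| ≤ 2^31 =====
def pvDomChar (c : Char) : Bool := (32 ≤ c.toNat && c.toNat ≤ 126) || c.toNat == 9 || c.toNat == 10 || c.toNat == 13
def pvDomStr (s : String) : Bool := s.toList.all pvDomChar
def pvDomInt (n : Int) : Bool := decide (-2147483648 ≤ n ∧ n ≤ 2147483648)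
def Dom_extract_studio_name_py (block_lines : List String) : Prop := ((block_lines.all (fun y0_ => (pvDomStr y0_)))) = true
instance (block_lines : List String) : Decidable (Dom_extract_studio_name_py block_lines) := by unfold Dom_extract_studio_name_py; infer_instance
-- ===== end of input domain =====

-- B replaces the per-line loop + mutable set with one joined lowered text scanned once per keyword (measured faster in a timing run).

-- the STUDIO_MAP literal, shared by both ports (dict items in insertion order)
def studioPairs : List (String × String) :=
  [("bridge studios", "Bridge Studios"), ("mammoth studios", "Mammoth Studios"),
   ("north shore studios", "North Shore Studios"), ("martini film studios", "Martini Film Studios"),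
   ("vancouver film studios", "Vancouver Film Studios"), ("pinewood studios", "Pinewood Studios"),
   ("studio city", "Studio City"), ("aspect film studios", "Aspect Film Studios"),
   ("big sky studios", "Big Sky Studios"), ("santa clarita studios", "Santa Clarita Studios"),
   ("universal lot studios", "Universal Lot Studios"), ("culver city studios", "Culver City Studios"),
   ("origo studios", "Origo Studios")]

-- ===== PORT A =====
def extract_studio_name_py (block_lines : List String) : String :=
  let found : PySem.Set String :=
    block_lines.foldl (fun s line =>
      let line_lower := PySem.Str.lower line
      studioPairs.foldl (fun s p =>
        if PySem.Str.isIn p.1 line_lower then PySem.Set.add s p.2 else s) s)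
      PySem.Set.empty
  PySem.Str.join " | " (PySem.List.sorted found (fun x => x) false)

-- ===== PORT B =====
def extract_studio_name_py_alt (block_lines : List String) : String :=
  let text := PySem.Str.lower (PySem.Str.join "\n" block_lines)
  let found : PySem.Set String :=
    PySem.Set.ofList ((studioPairs.filter (fun p => PySem.Str.isIn p.1 text)).map Prod.snd)
  PySem.Str.join " | " (PySem.List.sorted found (fun x => x) false)

-- ===== PRECONDITION & SPEC =====
def Spec_extract_studio_name_py (block_lines : List String) (out : String) : Prop := out = extract_studio_name_py_alt block_lines
instance (block_lines : List String) (out : String) : Decidable (Spec_extract_studio_name_py block_lines out) := by unfold Spec_extract_studio_name_py; infer_instance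

-- ===== CLAIM (what is proved, stated in full; the proofs are below) =====
def Claim_equal_extract_studio_name_py : Prop := ∀ (block_lines : List String), Dom_extract_studio_name_py block_lines → Spec_extract_studio_name_py block_lines (extract_studio_name_py block_lines)

-- ===== LEMMAS AND PROOFS =====

-- a prefix cannot cross a character it does not contain
theorem pv_prefix_append_cons_iff {α : Type} {c : α} {k : List α} (h : c ∉ k) :
    ∀ (a b : List α), (k <+: a ++ c :: b ↔ k <+: a) := by
  induction k with
  | nil => intro a b; simp
  | cons d k' ih =>
    intro a b
    cases a with
    | nil =>
      simp only [List.nil_append]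
      constructor
      · rintro ⟨t, ht⟩
        simp only [List.cons_append] at ht
        have : d = c := (List.cons.injEq _ _ _ _ ▸ ht).1
        exact absurd (this ▸ List.mem_cons_self) h
      · intro hp
        have := List.prefix_nil.mp hp
        simp at this
    | cons x a' =>
      simp only [List.cons_append, List.cons_prefix_cons]
      constructor
      · rintro ⟨hdx, hk'⟩
        exact ⟨hdx, (ih (fun hm => h (List.mem_cons_of_mem _ hm)) a' b).mp hk'⟩
      · rintro ⟨hdx, hk'⟩
        exact ⟨hdx, (ih (fun hm => h (List.mem_cons_of_mem _ hm)) a' b).mpr hk'⟩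

-- an infix occurrence cannot cross a character it does not contain
theorem pv_infix_append_cons_iff {α : Type} {c : α} {k : List α} (h : c ∉ k) :
    ∀ (a b : List α), (k <:+: a ++ c :: b ↔ k <:+: a ∨ k <:+: b) := by
  intro a
  induction a with
  | nil =>
    intro b
    constructor
    · intro hi
      rcases List.infix_cons_iff.mp (by simpa using hi) with hp | hi'
      · cases k with
        | nil => exact Or.inl List.nil_infix
        | cons d k' => exact absurd ((List.cons_prefix_cons.mp hp).1 ▸ List.mem_cons_self) h
      · exact Or.inr hi'
    · rintro (hi | hi)
      · have hk : k = [] := List.eq_nil_of_infix_nil hi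
        subst hk; exact List.nil_infix
      · exact hi.trans ⟨[c], [], by simp⟩
  | cons x a' ih =>
    intro b
    constructor
    · intro hi
      rcases List.infix_cons_iff.mp (by simpa using hi) with hp | hi'
      · exact Or.inl ((pv_prefix_append_cons_iff h (x :: a') b).mp (by simpa using hp)).isInfix
      · rcases (ih b).mp hi' with h1 | h2
        · exact Or.inl (List.infix_cons h1)
        · exact Or.inr h2
    · rintro (hi | hi)
      · exact hi.trans ⟨[], c :: b, by simp⟩
      · exact hi.trans ⟨(x :: a') ++ [c], [], by simp⟩

-- lowercasing commutes with the newline join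
theorem pv_lower_join : ∀ (ls : List (List Char)),
    PySem.Chars.lower (PySem.Chars.join ['\n'] ls)
      = PySem.Chars.join ['\n'] (ls.map PySem.Chars.lower) := by
  intro ls
  induction ls with
  | nil => simp [PySem.Chars.join, List.intercalate, PySem.Chars.lower]
  | cons x rest ih =>
    cases rest with
    | nil => simp [PySem.Chars.join, List.intercalate]
    | cons y r =>
      conv_rhs => rw [List.map_cons, List.map_cons, PySem.Chars.join_cons_cons, ← List.map_cons]
      rw [← ih, PySem.Chars.join_cons_cons]
      have hnl : PySem.Chars.lowerChar '\n' = '\n' := by decide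
      simp [PySem.Chars.lower, hnl]

-- a newline-free nonempty keyword occurs in '\n'.join(lines) iff it occurs in some line
theorem pv_infix_join_iff {k : List Char} (hc : '\n' ∉ k) (hne : k ≠ []) :
    ∀ (ls : List (List Char)), (k <:+: PySem.Chars.join ['\n'] ls ↔ ∃ l ∈ ls, k <:+: l) := by
  intro ls
  induction ls with
  | nil =>
    simp only [PySem.Chars.join]
    constructor
    · intro hi
      have : k = [] := List.eq_nil_of_infix_nil (by simpa [List.intercalate] using hi)
      exact absurd this hne
    · rintro ⟨l, hl, -⟩; simp at hl
  | cons x rest ih =>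
    cases rest with
    | nil =>
      simp [PySem.Chars.join, List.intercalate]
    | cons y r =>
      rw [PySem.Chars.join_cons_cons]
      have heq : x ++ ['\n'] ++ PySem.Chars.join ['\n'] (y :: r)
           = x ++ '\n' :: PySem.Chars.join ['\n'] (y :: r) := by simp
      rw [heq, pv_infix_append_cons_iff hc, ih]
      constructor
      · rintro (h1 | ⟨l, hl, h2⟩)
        · exact ⟨x, List.mem_cons_self, h1⟩
        · exact ⟨l, List.mem_cons_of_mem _ hl, h2⟩
      · rintro ⟨l, hl, h2⟩
        rcases List.mem_cons.mp hl with rfl | hl'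
        · exact Or.inl h2
        · exact Or.inr ⟨l, hl', h2⟩

-- Python: keyword in '\n'.join(lines).lower() iff keyword in some line.lower()
theorem pv_isIn_text_iff (kw : String) (hc : '\n' ∉ kw.toList) (hne : kw.toList ≠ []) (block_lines : List String) :
    (PySem.Str.isIn kw (PySem.Str.lower (PySem.Str.join "\n" block_lines)) = true
      ↔ ∃ line ∈ block_lines, PySem.Str.isIn kw (PySem.Str.lower line) = true) := by
  have hsep : "\n".toList = ['\n'] := by decide
  have hmap : (block_lines.map String.toList).map PySem.Chars.lower
      = block_lines.map (fun l => PySem.Chars.lower l.toList) := by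
    simp [List.map_map, Function.comp]
  rw [PySem.Str.isIn_eq, PySem.Str.toList_lower, PySem.Str.toList_join, hsep,
    pv_lower_join, hmap, PySem.Chars.isIn_iff_infix, pv_infix_join_iff hc hne]
  constructor
  · rintro ⟨l, hl, hi⟩
    rcases List.mem_map.mp hl with ⟨line, hline, rfl⟩
    exact ⟨line, hline, by rw [PySem.Str.isIn_eq, PySem.Str.toList_lower, PySem.Chars.isIn_iff_infix]; exact hi⟩
  · rintro ⟨line, hline, hi⟩
    exact ⟨PySem.Chars.lower line.toList, List.mem_map.mpr ⟨line, hline, rfl⟩,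
      by rw [PySem.Str.isIn_eq, PySem.Str.toList_lower, PySem.Chars.isIn_iff_infix] at hi; exact hi⟩

-- A's inner loop over the map, characterized
theorem pv_inner_mem (ll : String) (s : PySem.Set String) (x : String) :
    ∀ (ps : List (String × String)),
      (x ∈ ps.foldl (fun s p => if PySem.Str.isIn p.1 ll then PySem.Set.add s p.2 else s) s
        ↔ x ∈ s ∨ ∃ p ∈ ps, p.2 = x ∧ PySem.Str.isIn p.1 ll = true) := by
  intro ps
  induction ps generalizing s with
  | nil => simp
  | cons p ps ih =>
    simp only [List.foldl_cons]
    by_cases hp : PySem.Str.isIn p.1 ll = true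
    · rw [if_pos hp, ih]
      simp only [PySem.Set.mem_add, List.mem_cons]
      constructor
      · rintro ((hs | rfl) | ⟨q, hq, hqx, hqi⟩)
        · exact Or.inl hs
        · exact Or.inr ⟨p, Or.inl rfl, rfl, hp⟩
        · exact Or.inr ⟨q, Or.inr hq, hqx, hqi⟩
      · rintro (hs | ⟨q, (rfl | hq), hqx, hqi⟩)
        · exact Or.inl (Or.inl hs)
        · exact Or.inl (Or.inr hqx.symm)
        · exact Or.inr ⟨q, hq, hqx, hqi⟩
    · rw [if_neg hp, ih]
      simp only [List.mem_cons]
      constructor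
      · rintro (hs | ⟨q, hq, hqx, hqi⟩)
        · exact Or.inl hs
        · exact Or.inr ⟨q, Or.inr hq, hqx, hqi⟩
      · rintro (hs | ⟨q, (rfl | hq), hqx, hqi⟩)
        · exact Or.inl hs
        · exact absurd hqi hp
        · exact Or.inr ⟨q, hq, hqx, hqi⟩

-- A's accumulated set: membership
theorem pv_foldA_mem (x : String) :
    ∀ (lines : List String) (s : PySem.Set String),
      (x ∈ lines.foldl (fun s line =>
          studioPairs.foldl (fun s p =>
            if PySem.Str.isIn p.1 (PySem.Str.lower line) then PySem.Set.add s p.2 else s) s) s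
        ↔ x ∈ s ∨ ∃ p ∈ studioPairs, p.2 = x ∧ ∃ line ∈ lines, PySem.Str.isIn p.1 (PySem.Str.lower line) = true) := by
  intro lines
  induction lines with
  | nil => simp
  | cons l ls ih =>
    intro s
    simp only [List.foldl_cons]
    rw [ih, pv_inner_mem]
    constructor
    · rintro ((hs | ⟨p, hp, hpx, hpi⟩) | ⟨p, hp, hpx, line, hline, hi⟩)
      · exact Or.inl hs
      · exact Or.inr ⟨p, hp, hpx, l, List.mem_cons_self, hpi⟩
      · exact Or.inr ⟨p, hp, hpx, line, List.mem_cons_of_mem _ hline, hi⟩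
    · rintro (hs | ⟨p, hp, hpx, line, hline, hi⟩)
      · exact Or.inl (Or.inl hs)
      · rcases List.mem_cons.mp hline with rfl | hline'
        · exact Or.inl (Or.inr ⟨p, hp, hpx, hi⟩)
        · exact Or.inr ⟨p, hp, hpx, line, hline', hi⟩

-- A's accumulated set is duplicate-free
theorem pv_foldA_nodup :
    ∀ (lines : List String) (s : PySem.Set String), s.Nodup →
      (lines.foldl (fun s line =>
          studioPairs.foldl (fun s p =>
            if PySem.Str.isIn p.1 (PySem.Str.lower line) then PySem.Set.add s p.2 else s) s) s).Nodup := by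
  have inner : ∀ (ps : List (String × String)) (ll : String) (s : PySem.Set String), s.Nodup →
      (ps.foldl (fun s p => if PySem.Str.isIn p.1 ll then PySem.Set.add s p.2 else s) s).Nodup := by
    intro ps ll
    induction ps with
    | nil => intro s hs; exact hs
    | cons p ps ih =>
      intro s hs
      simp only [List.foldl_cons]
      by_cases hp : PySem.Str.isIn p.1 ll = true
      · rw [if_pos hp]; exact ih _ (PySem.Set.nodup_add s p.2 hs)
      · rw [if_neg hp]; exact ih _ hs
  intro lines
  induction lines with
  | nil => intro s hs; exact hs
  | cons l ls ih =>
    intro s hs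
    simp only [List.foldl_cons]
    exact ih _ (inner studioPairs (PySem.Str.lower l) s hs)

-- each keyword in the map is nonempty and newline-free
theorem pv_studio_kw_ok : ∀ p ∈ studioPairs, '\n' ∉ p.1.toList ∧ p.1.toList ≠ [] := by decide

-- the two found-collections are permutations of each other
theorem pv_found_perm (block_lines : List String) :
    (block_lines.foldl (fun s line =>
        studioPairs.foldl (fun s p =>
          if PySem.Str.isIn p.1 (PySem.Str.lower line) then PySem.Set.add s p.2 else s) s)
      PySem.Set.empty).Perm
    (PySem.Set.ofList ((studioPairs.filter
        (fun p => PySem.Str.isIn p.1 (PySem.Str.lower (PySem.Str.join "\n" block_lines)))).map Prod.snd)) := by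
  apply (List.perm_ext_iff_of_nodup (pv_foldA_nodup block_lines PySem.Set.empty List.nodup_nil)
    (PySem.Set.nodup_ofList _)).mpr
  intro x
  rw [pv_foldA_mem, PySem.Set.mem_ofList]
  simp only [List.mem_map, List.mem_filter]
  constructor
  · rintro (hs | ⟨p, hp, hpx, line, hline, hi⟩)
    · exact absurd hs (List.not_mem_nil)
    · refine ⟨p, ⟨hp, ?_⟩, hpx⟩
      have := pv_studio_kw_ok p hp
      exact (pv_isIn_text_iff p.1 this.1 this.2 block_lines).mpr ⟨line, hline, hi⟩
  · rintro ⟨p, ⟨hp, hin⟩, hpx⟩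
    have := pv_studio_kw_ok p hp
    rcases (pv_isIn_text_iff p.1 this.1 this.2 block_lines).mp hin with ⟨line, hline, hi⟩
    exact Or.inr ⟨p, hp, hpx, line, hline, hi⟩

-- ===== VERDICT (by name: the statement is the Claim_ definition above) =====
theorem extract_studio_name_py_spec : Claim_equal_extract_studio_name_py := by
  intro block_lines _
  unfold Spec_extract_studio_name_py extract_studio_name_py extract_studio_name_py_alt
  have := PySem.List.sorted_eq_sorted_of_perm _ _ (fun x : String => x)
    (fun a b h => h) (pv_found_perm block_lines)
  simp only [this]
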